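-- pv_equiv track=rewrite | github.com/williamfrack18-alt/anmar-engine | app.py | current_engineer_load
-- ===== SOURCE A (Python) =====
-- ENGINEER_POOL = ["Maria P.", "Juan"]
--
-- def current_engineer_load(alerts):
--     load = {e: 0 for e in ENGINEER_POOL}
--     for t in alerts:
--         status = t.get("status")
--         eng = t.get("engineer")
--         if eng in load and status in ("accepted", "developing"):
--             load[eng] += 1
--     return load
-- ===== SOURCE B (Python) =====
-- ENGINEER_POOL = ["Maria P.", "Juan"]
--
-- def current_engineer_load(alerts):
--     n = len(alerts)
--     if n == 0:
--         return {e: 0 for e in ENGINEER_POOL}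
--     if n == 1:
--         t = alerts[0]
--         active = t.get("status") in ("accepted", "developing")
--         return {e: (1 if active and t.get("engineer") == e else 0)
--                 for e in ENGINEER_POOL}
--     mid = n // 2
--     left = current_engineer_load(alerts[:mid])
--     right = current_engineer_load(alerts[mid:])
--     return {e: left[e] + right[e] for e in ENGINEER_POOL}
-- ===== Notes on version B (the rewrite author's own statement) =====
-- stated objective: alternative
-- what changed: Replaces A's single guarded mutable-dict accumulation loop with a divide-and-conquer recursion: split the ticket list in half, recursively compute each half's per-engineer load, and merge the two dicts by summing per pooled engineer (base cases: empty list and a single ticket).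
import Mathlib
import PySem

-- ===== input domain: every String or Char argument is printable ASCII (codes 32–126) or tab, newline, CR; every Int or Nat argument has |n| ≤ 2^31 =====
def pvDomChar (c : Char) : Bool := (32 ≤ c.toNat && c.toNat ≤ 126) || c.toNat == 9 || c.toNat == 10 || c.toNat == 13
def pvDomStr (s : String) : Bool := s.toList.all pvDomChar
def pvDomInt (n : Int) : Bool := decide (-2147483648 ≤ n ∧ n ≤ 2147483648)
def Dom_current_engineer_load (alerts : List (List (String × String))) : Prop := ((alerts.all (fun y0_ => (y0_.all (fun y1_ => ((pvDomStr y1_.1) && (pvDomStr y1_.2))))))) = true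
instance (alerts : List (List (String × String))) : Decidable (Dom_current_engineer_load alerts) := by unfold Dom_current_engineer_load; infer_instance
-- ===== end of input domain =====

-- B replaces A's single accumulation loop with a divide-and-conquer recursion (halve, recurse, merge by summing); same result, different algorithm, no speed claim.

-- ===== PORT A =====
-- t.get(k): first-match lookup in the association list (exact for Python dicts, which have unique keys)
def pvGetT (t : List (String × String)) (k : String) : Option String :=
  (t.find? (fun p => p.1 == k)).map (·.2)

def pvPool : List String := ["Maria P.", "Juan"]

-- one iteration of A's for-loop body
def pvStepA (load : PySem.Dict String Int) (t : List (String × String)) : PySem.Dict String Int :=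
  let status := pvGetT t "status"
  let eng := pvGetT t "engineer"
  if ((match eng with | some e => load.contains e | none => false) &&
      (status == some "accepted" || status == some "developing")) then
    match eng with
    | some e => load.modify e 0 (· + 1)
    | none => load
  else load

def current_engineer_load (alerts : List (List (String × String))) : List (String × Int) :=
  (alerts.foldl pvStepA (pvPool.foldl (fun d e => d.insert e 0) PySem.Dict.empty)).items

-- ===== PORT B =====
-- left[e] / right[e]: dict lookup (first match; the key is always present here)
def pvLook (xs : List (String × Int)) (e : String) : Int :=
  ((xs.find? (fun p => p.1 == e)).map (·.2)).getD 0

def current_engineer_load_alt : List (List (String × String)) → List (String × Int)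
  | [] => pvPool.map (fun e => (e, (0 : Int)))
  | [t] =>
    let active := pvGetT t "status" == some "accepted" || pvGetT t "status" == some "developing"
    pvPool.map (fun e => (e, if active && (pvGetT t "engineer" == some e) then (1 : Int) else 0))
  | a :: b :: rest =>
    let alerts := a :: b :: rest
    let mid := alerts.length / 2
    let left := current_engineer_load_alt (alerts.take mid)
    let right := current_engineer_load_alt (alerts.drop mid)
    pvPool.map (fun e => (e, pvLook left e + pvLook right e))
termination_by alerts => alerts.length
decreasing_by
  · simp; omega
  · simp; omega

-- ===== PRECONDITION & SPEC =====
def Spec_current_engineer_load (alerts : List (List (String × String))) (out : List (String × Int)) : Prop := out = current_engineer_load_alt alerts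
instance (alerts : List (List (String × String))) (out : List (String × Int)) : Decidable (Spec_current_engineer_load alerts out) := by unfold Spec_current_engineer_load; infer_instance

-- ===== CLAIM (what is proved, stated in full; the proofs are below) =====
def Claim_equal_current_engineer_load : Prop := ∀ (alerts : List (List (String × String))), Dom_current_engineer_load alerts → Spec_current_engineer_load alerts (current_engineer_load alerts)

-- ===== LEMMAS AND PROOFS =====

-- the common characterisation: number of active tickets assigned to engineer e
def pvCnt (alerts : List (List (String × String))) (e : String) : Int :=
  (((alerts.filter (fun t =>
      pvGetT t "status" == some "accepted" || pvGetT t "status" == some "developing")).map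
      (fun t => pvGetT t "engineer")).count (some e) : Int)

lemma pvCnt_append (xs ys : List (List (String × String))) (e : String) :
    pvCnt (xs ++ ys) e = pvCnt xs e + pvCnt ys e := by
  unfold pvCnt
  rw [List.filter_append, List.map_append, List.count_append]
  push_cast; ring

lemma pvLook_map (f : String → Int) (e : String) (he : e ∈ pvPool) :
    pvLook (pvPool.map (fun x => (x, f x))) e = f e := by
  fin_cases he <;> simp [pvLook, pvPool]

-- B computes pvCnt for every pooled engineer
lemma pvAlt_eq (alerts : List (List (String × String))) :
    current_engineer_load_alt alerts = pvPool.map (fun e => (e, pvCnt alerts e)) := by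
  induction alerts using current_engineer_load_alt.induct with
  | case1 => simp [current_engineer_load_alt, pvCnt]
  | case2 t =>
    unfold current_engineer_load_alt
    refine List.map_congr_left ?_
    intro e _
    simp only [pvCnt, List.filter]
    by_cases hs : (pvGetT t "status" == some "accepted" ||
        pvGetT t "status" == some "developing") = true
    · by_cases he : pvGetT t "engineer" = some e
      · simp [hs, he]
      · simp [hs, he]
    · simp [hs]
  | case3 a b rest al mid ihL ihR =>
    unfold current_engineer_load_alt
    simp only [al, mid] at ihL ihR
    refine List.map_congr_left ?_
    intro e he
    have hcnt := pvCnt_append ((a :: b :: rest).take ((a :: b :: rest).length / 2))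
        ((a :: b :: rest).drop ((a :: b :: rest).length / 2)) e
    rw [List.take_append_drop] at hcnt
    rw [ihL, ihR, pvLook_map _ e he, pvLook_map _ e he, hcnt]

-- A's loop body never changes the key list of the accumulator
lemma pvStepA_keys (load : PySem.Dict String Int) (t : List (String × String)) :
    (pvStepA load t).keys = load.keys := by
  unfold pvStepA
  cases h : pvGetT t "engineer" with
  | none => simp
  | some e =>
    simp only [h]
    split
    · rename_i hcond
      rw [PySem.Dict.keys_modify]
      exact PySem.Dict.keys_insert_of_contains _ _ (Bool.and_elim_left hcond)
    · rfl

lemma pvFold_keys (alerts : List (List (String × String))) (load : PySem.Dict String Int) :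
    (alerts.foldl pvStepA load).keys = load.keys := by
  induction alerts generalizing load with
  | nil => rfl
  | cons t rest ih => simpa [List.foldl, pvStepA_keys] using ih (pvStepA load t)

-- value invariant: for a pooled engineer e, A's loop adds exactly pvCnt
lemma pvFold_getD (alerts : List (List (String × String))) (load : PySem.Dict String Int)
    (hk : load.keys = pvPool) (e : String) (he : e ∈ pvPool) :
    (alerts.foldl pvStepA load).getD e 0 = load.getD e 0 + pvCnt alerts e := by
  induction alerts generalizing load with
  | nil => simp [pvCnt]
  | cons t rest ih =>
    have hk' : (pvStepA load t).keys = pvPool := by rw [pvStepA_keys, hk]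
    have hcont : ∀ x : String, load.contains x = decide (x ∈ pvPool) := by
      intro x; rw [PySem.Dict.contains_eq_decide_mem_keys, hk]
    rw [List.foldl_cons, ih (pvStepA load t) hk']
    by_cases hs : (pvGetT t "status" == some "accepted" ||
        pvGetT t "status" == some "developing") = true
    · cases heng : pvGetT t "engineer" with
      | none =>
        simp [pvStepA, heng, hs, pvCnt, List.filter_cons, List.count_cons]
      | some e' =>
        by_cases hc : e' ∈ pvPool
        · by_cases hee : e' = e
          · subst hee
            simp [pvStepA, heng, hs, hcont, hc, pvCnt, List.filter_cons, List.count_cons,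
              PySem.Dict.getD_modify_self]
            ring
          · have hm : (load.modify e' 0 (· + 1)).getD e 0 = load.getD e 0 :=
              PySem.Dict.getD_modify_of_ne load 0 (· + 1) (Ne.symm hee)
            simp [pvStepA, heng, hs, hcont, hc, hee, hm, pvCnt, List.filter_cons,
              List.count_cons]
        · have hne : e' ≠ e := fun h => hc (h ▸ he)
          simp [pvStepA, heng, hs, hcont, hc, pvCnt, List.filter_cons, List.count_cons, hne]
    · have hstep : (pvStepA load t) = load := by
        unfold pvStepA
        cases h : pvGetT t "engineer" <;> simp [h, hs]
      simp [hstep, pvCnt, List.filter_cons, hs]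

-- ===== VERDICT (by name: the statement is the Claim_ definition above) =====
theorem current_engineer_load_spec : Claim_equal_current_engineer_load := by
  intro alerts _
  unfold Spec_current_engineer_load current_engineer_load
  rw [pvAlt_eq]
  set init : PySem.Dict String Int := pvPool.foldl (fun d e => d.insert e 0) PySem.Dict.empty with hinit
  have hkinit : init.keys = pvPool := by rw [hinit]; decide
  have hkeys : (alerts.foldl pvStepA init).keys = pvPool := by rw [pvFold_keys, hkinit]
  have hnd : (alerts.foldl pvStepA init).keys.Nodup := by rw [hkeys]; decide
  rw [PySem.Dict.items_eq_map_keys _ hnd 0, hkeys]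
  refine List.map_congr_left ?_
  intro e he
  have h0 : init.getD e 0 = 0 := by
    rw [hinit]; fin_cases he <;> decide
  rw [pvFold_getD alerts init hkinit e he, h0]
  simp
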